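-- pv_equiv track=rewrite | github.com/elneitans/spar_drafts | perturb_scenarios_llm.py | detect_prompt_column
-- ===== SOURCE A (Python) =====
-- from typing import Dict, Iterable, Iterator, List, Optional, Sequence, Tuple
--
-- DEFAULT_INPUT_PROMPT_CANDIDATES = (
--     "query",
--     "prompt",
--     "original_prompt",
--     "scenario",
--     "text",
--     "input",
--     "user_prompt",
-- )
--
-- def detect_prompt_column(fieldnames: Sequence[str], explicit_prompt_column: Optional[str]) -> str:
--     if explicit_prompt_column:
--         if explicit_prompt_column not in fieldnames:
--             raise ValueError(
--                 f"Prompt column '{explicit_prompt_column}' not found. Available columns: {list(fieldnames)}"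
--             )
--         return explicit_prompt_column
--
--     normalized = {name.lower(): name for name in fieldnames}
--     for candidate in DEFAULT_INPUT_PROMPT_CANDIDATES:
--         if candidate.lower() in normalized:
--             return normalized[candidate.lower()]
--
--     raise ValueError(
--         "Could not infer the prompt column. Pass --prompt-column explicitly."
--     )
-- ===== SOURCE B (Python) =====
-- DEFAULT_INPUT_PROMPT_CANDIDATES = (
--     "query",
--     "prompt",
--     "original_prompt",
--     "scenario",
--     "text",
--     "input",
--     "user_prompt",
-- )
--
-- def detect_prompt_column(fieldnames, explicit_prompt_column):
--     if explicit_prompt_column: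
--         if explicit_prompt_column not in fieldnames:
--             raise ValueError(
--                 f"Prompt column '{explicit_prompt_column}' not found. Available columns: {list(fieldnames)}"
--             )
--         return explicit_prompt_column
--
--     # Single pass over the columns: keep the name whose lowercase form has the
--     # highest candidate priority (lowest index); first occurrence wins.
--     priority = {c: i for i, c in enumerate(DEFAULT_INPUT_PROMPT_CANDIDATES)}
--     best = None
--     for name in fieldnames:
--         rank = priority.get(name.lower())
--         if rank is not None and (best is None or rank < best[0]):
--             best = (rank, name)
--     if best is None:
--         raise ValueError(
--             "Could not infer the prompt column. Pass --prompt-column explicitly."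
--         )
--     return best[1]
-- ===== Notes on version B (the rewrite author's own statement) =====
-- stated objective: alternative
-- what changed: Inverts the loops: instead of building a lowercase->name dict and scanning the candidate list, B makes one pass over fieldnames keeping the column whose lowercase form has the best candidate priority; Pre_ excludes inputs where A raises ValueError and fieldname lists carrying two different spellings of the same candidate column, where A's dict-overwrite pick of the last spelling is accidental (B keeps the first).
-- outside the precondition, e.g. on detect_prompt_column(['Prompt', 'prompt'], None): A returns 'prompt', B returns 'Prompt'
import Mathlib
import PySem

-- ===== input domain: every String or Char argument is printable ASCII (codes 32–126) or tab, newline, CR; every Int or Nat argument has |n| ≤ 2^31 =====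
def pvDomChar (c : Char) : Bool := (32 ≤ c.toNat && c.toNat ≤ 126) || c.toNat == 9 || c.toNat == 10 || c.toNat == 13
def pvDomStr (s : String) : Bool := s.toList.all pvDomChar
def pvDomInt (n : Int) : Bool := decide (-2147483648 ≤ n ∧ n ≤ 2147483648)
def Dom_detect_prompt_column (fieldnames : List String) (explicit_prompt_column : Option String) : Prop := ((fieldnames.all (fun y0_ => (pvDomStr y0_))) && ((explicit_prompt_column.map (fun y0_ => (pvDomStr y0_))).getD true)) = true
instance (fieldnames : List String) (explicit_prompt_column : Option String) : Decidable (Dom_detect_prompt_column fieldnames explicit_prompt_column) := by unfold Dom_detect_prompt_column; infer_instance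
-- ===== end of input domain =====

-- B inverts the loops: one pass over fieldnames keeping the column with the best
-- candidate priority, instead of A's lowercase->name dict scanned per candidate.

def pvCandidates : List String :=
  ["query", "prompt", "original_prompt", "scenario", "text", "input", "user_prompt"]

-- ===== PORT A =====
-- normalized = {name.lower(): name for name in fieldnames}
def pvNormFold (fieldnames : List String) : PySem.Dict String String :=
  fieldnames.foldl (fun d n => d.insert (PySem.Str.lower n) n) PySem.Dict.empty

-- for candidate in DEFAULT_INPUT_PROMPT_CANDIDATES: …; final raise ported as ""
def pvLoopA (normalized : PySem.Dict String String) : List String → String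
  | [] => ""
  | c :: rest =>
    if normalized.contains (PySem.Str.lower c) then normalized.getD (PySem.Str.lower c) ""
    else pvLoopA normalized rest

def detect_prompt_column (fieldnames : List String) (explicit_prompt_column : Option String) : String :=
  if explicit_prompt_column.getD "" ≠ "" then
    -- raise ValueError ported as "" (excluded by Pre_)
    if ¬ fieldnames.contains (explicit_prompt_column.getD "") then ""
    else explicit_prompt_column.getD ""
  else
    pvLoopA (pvNormFold fieldnames) pvCandidates

-- ===== PORT B =====
-- priority = {c: i for i, c in enumerate(DEFAULT_INPUT_PROMPT_CANDIDATES)}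
def pvPriority : PySem.Dict String Int :=
  (PySem.List.enumerate pvCandidates 0).foldl (fun d p => d.insert p.2 p.1) PySem.Dict.empty

-- loop body: rank = priority.get(name.lower()); update best on a strictly smaller rank
def pvStep (best : Option (Int × String)) (name : String) : Option (Int × String) :=
  match pvPriority.get? (PySem.Str.lower name) with
  | none => best
  | some rank =>
    match best with
    | none => some (rank, name)
    | some b => if rank < b.1 then some (rank, name) else best

def detect_prompt_column_alt (fieldnames : List String) (explicit_prompt_column : Option String) : String :=
  if explicit_prompt_column.getD "" ≠ "" then
    if ¬ fieldnames.contains (explicit_prompt_column.getD "") then ""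
    else explicit_prompt_column.getD ""
  else
    -- raise ValueError ported as "" (excluded by Pre_)
    match fieldnames.foldl pvStep none with
    | some b => b.2
    | none => ""

-- ===== PRECONDITION & SPEC =====
-- Pre_ excludes (a) the inputs where A raises ValueError (truthy explicit column
-- absent from fieldnames, or no candidate match), and (b) fieldname lists carrying
-- two DIFFERENT spellings of the same candidate column (case-colliding), where A's
-- dict-overwrite pick of the last spelling is accidental (B keeps the first).
def Pre_detect_prompt_column (fieldnames : List String) (explicit_prompt_column : Option String) : Prop :=
  if explicit_prompt_column.getD "" = "" then
    fieldnames.any (fun n => pvCandidates.contains (PySem.Str.lower n)) = true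
      ∧ (fieldnames.filter (fun n => pvCandidates.contains (PySem.Str.lower n))).Pairwise
          (fun a b => PySem.Str.lower a = PySem.Str.lower b → a = b)
  else
    explicit_prompt_column.getD "" ∈ fieldnames
instance (fieldnames : List String) (explicit_prompt_column : Option String) : Decidable (Pre_detect_prompt_column fieldnames explicit_prompt_column) := by unfold Pre_detect_prompt_column; infer_instance

def pvWitness_detect_prompt_column : List String × Option String := (["id", "Prompt"], none)

def Spec_detect_prompt_column (fieldnames : List String) (explicit_prompt_column : Option String) (out : String) : Prop := out = detect_prompt_column_alt fieldnames explicit_prompt_column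
instance (fieldnames : List String) (explicit_prompt_column : Option String) (out : String) : Decidable (Spec_detect_prompt_column fieldnames explicit_prompt_column out) := by unfold Spec_detect_prompt_column; infer_instance

-- ===== CLAIM (what is proved, stated in full; the proofs are below) =====
def Claim_equal_detect_prompt_column : Prop := ∀ (fieldnames : List String) (explicit_prompt_column : Option String), Dom_detect_prompt_column fieldnames explicit_prompt_column → Pre_detect_prompt_column fieldnames explicit_prompt_column → Spec_detect_prompt_column fieldnames explicit_prompt_column (detect_prompt_column fieldnames explicit_prompt_column)

-- ===== LEMMAS AND PROOFS =====

-- first index of s in a candidate list, counting from i (what B's priority dict answers)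
def pvRk : List String → Int → String → Option Int
  | [], _, _ => none
  | c :: t, i, s => if c = s then some i else pvRk t (i + 1) s

-- last name in f whose lower() is k (what A's dict stores at k)
def pvLastM (f : List String) (k : String) : Option String :=
  f.foldl (fun m n => if PySem.Str.lower n == k then some n else m) none

-- A's candidate loop, rephrased over pvLastM
def pvLoopLM (f : List String) : List String → String
  | [] => ""
  | c :: t => match pvLastM f c with | some m => m | none => pvLoopLM f t

-- B's loop body with an abstract rank function
def pvGStep (rk : String → Option Int) (best : Option (Int × String)) (name : String) : Option (Int × String) :=
  match rk (PySem.Str.lower name) with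
  | none => best
  | some rank =>
    match best with
    | none => some (rank, name)
    | some b => if rank < b.1 then some (rank, name) else best

-- right-recursive description of B's fold: minimal rank, earliest occurrence
def pvSel (rk : String → Option Int) : List String → Option (Int × String)
  | [] => none
  | n :: t =>
    match rk (PySem.Str.lower n), pvSel rk t with
    | none, r => r
    | some k, none => some (k, n)
    | some k, some p => if k ≤ p.1 then some (k, n) else some p

def pvMerge (b r : Option (Int × String)) : Option (Int × String) :=
  match b, r with
  | none, r => r
  | some b, none => some b
  | some b, some p => if p.1 < b.1 then some p else some b

theorem pv_get?_normFold (l : List String) (d : PySem.Dict String String) (k : String) :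
    (l.foldl (fun d n => d.insert (PySem.Str.lower n) n) d).get? k
      = l.foldl (fun m n => if PySem.Str.lower n == k then some n else m) (d.get? k) := by
  induction l generalizing d with
  | nil => rfl
  | cons n rest ih =>
    simp only [List.foldl]
    rw [ih, PySem.Dict.get?_insert]
    by_cases h : PySem.Str.lower n = k
    · simp [h]
    · simp [h, Ne.symm h]

theorem pv_loopA_eq_LM (f : List String) (cs : List String)
    (h : ∀ c ∈ cs, PySem.Str.lower c = c) :
    pvLoopA (pvNormFold f) cs = pvLoopLM f cs := by
  induction cs with
  | nil => rfl
  | cons c rest ih =>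
    simp only [pvLoopA, pvLoopLM]
    have hget : (pvNormFold f).get? (PySem.Str.lower c) = pvLastM f (PySem.Str.lower c) := by
      unfold pvNormFold pvLastM
      rw [pv_get?_normFold]
      simp [PySem.Dict.get?_empty]
    have hc : PySem.Str.lower c = c := h c (by simp)
    rw [PySem.Dict.contains_eq_isSome_get?, PySem.Dict.getD_eq_get?_getD, hget, hc]
    cases hm : pvLastM f c with
    | none => simpa using ih (fun x hx => h x (by simp [hx]))
    | some n => simp [hm]

theorem pv_priority_eq (s : String) : pvPriority.get? s = pvRk pvCandidates 0 s := by
  have hP : pvPriority = PySem.Dict.mk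
      [("query", 0), ("prompt", 1), ("original_prompt", 2), ("scenario", 3),
       ("text", 4), ("input", 5), ("user_prompt", 6)] := by decide
  rw [hP]
  simp only [pvCandidates, pvRk, PySem.Dict.get?_mk_cons]
  norm_num
  rfl

theorem pv_rk_shift (t : List String) (i : Int) (s : String) :
    pvRk t (i + 1) s = (pvRk t i s).map (· + 1) := by
  induction t generalizing i with
  | nil => rfl
  | cons c r ih =>
    by_cases h : c = s
    · simp [pvRk, h]
    · simp [pvRk, h, ih]

theorem pv_rk_nonneg (t : List String) (i : Int) (s : String) (k : Int)
    (h : pvRk t i s = some k) : i ≤ k := by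
  induction t generalizing i with
  | nil => simp [pvRk] at h
  | cons c r ih =>
    by_cases hc : c = s
    · simp [pvRk, hc] at h; omega
    · simp [pvRk, hc] at h
      have := ih (i + 1) h
      omega

theorem pv_fold_merge (rk : String → Option Int) (f : List String) (acc : Option (Int × String)) :
    f.foldl (pvGStep rk) acc = pvMerge acc (pvSel rk f) := by
  induction f generalizing acc with
  | nil => cases acc <;> rfl
  | cons n t ih =>
    simp only [List.foldl, ih]
    rcases hr : rk (PySem.Str.lower n) with _ | k <;>
      rcases acc with _ | b <;>
      rcases hs : pvSel rk t with _ | p <;>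
      simp [pvGStep, pvSel, pvMerge, hr, hs] <;>
      (try split_ifs) <;>
      (try simp only [pvMerge]) <;>
      (try split_ifs) <;>
      first
        | rfl
        | omega
        | (intro _; exfalso; omega)
        | (exfalso; omega)

theorem pv_sel_none (rk : String → Option Int) (f : List String)
    (h : ∀ n ∈ f, rk (PySem.Str.lower n) = none) : pvSel rk f = none := by
  induction f with
  | nil => rfl
  | cons n t ih =>
    have := h n (by simp)
    simp [pvSel, this, ih (fun m hm => h m (by simp [hm]))]

theorem pv_sel_shift (rk rk' : String → Option Int) (f : List String)
    (h : ∀ n ∈ f, rk' (PySem.Str.lower n) = (rk (PySem.Str.lower n)).map (· + 1)) :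
    pvSel rk' f = (pvSel rk f).map (fun p => (p.1 + 1, p.2)) := by
  induction f with
  | nil => rfl
  | cons n t ih =>
    have hn := h n (by simp)
    have iht := ih (fun m hm => h m (by simp [hm]))
    rcases hr : rk (PySem.Str.lower n) with _ | k <;>
      rcases hs : pvSel rk t with _ | p <;>
      simp [pvSel, hn, hr, hs, iht] <;>
      split_ifs <;> first | rfl | omega | simp_all

theorem pv_sel_rank_spec (rk : String → Option Int) (f : List String) (p : Int × String)
    (h : pvSel rk f = some p) : p.2 ∈ f ∧ rk (PySem.Str.lower p.2) = some p.1 := by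
  induction f generalizing p with
  | nil => simp [pvSel] at h
  | cons n t ih =>
    rcases hr : rk (PySem.Str.lower n) with _ | k
    · rcases hs : pvSel rk t with _ | q
      · simp [pvSel, hr, hs] at h
      · simp [pvSel, hr, hs] at h
        subst h
        obtain ⟨h1, h2⟩ := ih q hs
        exact ⟨by simp [h1], h2⟩
    · rcases hs : pvSel rk t with _ | q
      · simp [pvSel, hr, hs] at h
        subst h
        exact ⟨by simp, by simpa using hr⟩
      · simp [pvSel, hr, hs] at h
        split_ifs at h
        · injection h with h
          subst h
          exact ⟨by simp, by simpa using hr⟩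
        · injection h with h
          subst h
          obtain ⟨h1, h2⟩ := ih q hs
          exact ⟨by simp [h1], h2⟩

theorem pv_sel_zero (rk : String → Option Int) (c : String) (f : List String) (m : String)
    (h1 : rk c = some 0)
    (h2 : ∀ s k, s ≠ c → rk s = some k → 1 ≤ k)
    (hf : f.find? (fun n => PySem.Str.lower n == c) = some m) :
    pvSel rk f = some (0, m) := by
  induction f generalizing m with
  | nil => simp at hf
  | cons n t ih =>
    by_cases hn : PySem.Str.lower n = c
    · rw [List.find?_cons_of_pos (by simp [hn])] at hf
      cases hf
      rcases hs : pvSel rk t with _ | p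
      · simp [pvSel, hn, h1, hs]
      · obtain ⟨_, hrk⟩ := pv_sel_rank_spec rk t p hs
        have hp1 : 0 ≤ p.1 := by
          by_cases hc : PySem.Str.lower p.2 = c
          · rw [hc, h1] at hrk; injection hrk with hrk; omega
          · have := h2 _ _ hc hrk; omega
        simp [pvSel, hn, h1, hs, hp1]
    · rw [List.find?_cons_of_neg (by simp [hn])] at hf
      have iht := ih m hf
      rcases hr : rk (PySem.Str.lower n) with _ | k
      · simp [pvSel, hr, iht]
      · have hk : 1 ≤ k := h2 _ _ hn hr
        have : ¬ (k ≤ (0 : Int)) := by omega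
        simp [pvSel, hr, iht, this]

theorem pv_lastM_frozen (t : List String) (c : String) (acc : Option String)
    (h : ∀ n ∈ t, PySem.Str.lower n ≠ c) :
    t.foldl (fun m n => if PySem.Str.lower n == c then some n else m) acc = acc := by
  induction t generalizing acc with
  | nil => rfl
  | cons n r ih =>
    have hn : ¬ (PySem.Str.lower n == c) = true := by simp [h n (by simp)]
    simp only [List.foldl, if_neg hn]
    exact ih acc (fun m hm => h m (by simp [hm]))

theorem pv_lastM_none (f : List String) (c : String)
    (h : ∀ n ∈ f, PySem.Str.lower n ≠ c) : pvLastM f c = none :=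
  pv_lastM_frozen f c none h

theorem pv_lastM_absorb (t : List String) (c : String) (n : String)
    (h : ∀ m ∈ t, PySem.Str.lower m = c → m = n) :
    t.foldl (fun m x => if PySem.Str.lower x == c then some x else m) (some n) = some n := by
  induction t with
  | nil => rfl
  | cons x r ih =>
    by_cases hx : PySem.Str.lower x = c
    · have hxn : x = n := h x (by simp) hx
      simp only [List.foldl_cons, hxn, ite_self]
      exact ih (fun m hm hc => h m (by simp [hm]) hc)
    · simp only [List.foldl_cons, if_neg (by simp [hx] : ¬ (PySem.Str.lower x == c) = true)]
      exact ih (fun m hm hc => h m (by simp [hm]) hc)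

theorem pv_lastM_eq_find (f : List String) (c : String)
    (h : ∀ m1 ∈ f, ∀ m2 ∈ f, PySem.Str.lower m1 = c → PySem.Str.lower m2 = c → m1 = m2) :
    pvLastM f c = f.find? (fun n => PySem.Str.lower n == c) := by
  induction f with
  | nil => rfl
  | cons n t ih =>
    by_cases hn : PySem.Str.lower n = c
    · have hb : (PySem.Str.lower n == c) = true := by simp [hn]
      unfold pvLastM
      rw [List.foldl_cons, if_pos hb,
          pv_lastM_absorb t c n (fun m hm hc => h m (by simp [hm]) n (by simp) hc hn)]
      simp only [List.find?_cons, hb]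
    · unfold pvLastM at *
      simp only [List.foldl, if_neg (by simp [hn] : ¬ (PySem.Str.lower n == c) = true)]
      rw [ih (fun m1 h1 m2 h2 => h m1 (by simp [h1]) m2 (by simp [h2]))]
      have hb' : (PySem.Str.lower n == c) = false := by simp [hn]
      simp only [List.find?_cons, hb']

theorem pv_main (cs : List String) (f : List String)
    (huniq : ∀ c ∈ cs, ∀ m1 ∈ f, ∀ m2 ∈ f,
        PySem.Str.lower m1 = c → PySem.Str.lower m2 = c → m1 = m2) :
    pvLoopLM f cs = (match pvSel (pvRk cs 0) f with | some p => p.2 | none => "") := by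
  induction cs with
  | nil =>
    have hs : pvSel (pvRk [] 0) f = none := pv_sel_none _ _ (fun n _ => rfl)
    simp [pvLoopLM, hs]
  | cons c cst ih =>
    by_cases hm : ∃ n ∈ f, PySem.Str.lower n = c
    · obtain ⟨n0, hn0, hl0⟩ := hm
      have hfs : (f.find? (fun n => PySem.Str.lower n == c)).isSome :=
        List.find?_isSome.mpr ⟨n0, hn0, by simp [hl0]⟩
      obtain ⟨m, hfind⟩ := Option.isSome_iff_exists.mp hfs
      have hlast : pvLastM f c = some m := by
        rw [pv_lastM_eq_find f c (huniq c (by simp)), hfind]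
      have hsel : pvSel (pvRk (c :: cst) 0) f = some (0, m) := by
        apply pv_sel_zero _ c f m
        · simp [pvRk]
        · intro s k hs hk
          simp only [pvRk, if_neg (fun hcs : c = s => hs hcs.symm)] at hk
          have := pv_rk_nonneg cst (0 + 1) s k hk
          omega
        · exact hfind
      simp [pvLoopLM, hlast, hsel]
    · have hm' : ∀ n ∈ f, PySem.Str.lower n ≠ c := by
        intro n hn hc
        exact hm ⟨n, hn, hc⟩
      have hlast : pvLastM f c = none := pv_lastM_none f c hm'
      have hshift : ∀ n ∈ f,
          pvRk (c :: cst) 0 (PySem.Str.lower n)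
            = (pvRk cst 0 (PySem.Str.lower n)).map (· + 1) := by
        intro n hn
        have hcn : ¬ c = PySem.Str.lower n := fun hc => hm' n hn hc.symm
        simp only [pvRk, if_neg hcn]
        exact pv_rk_shift cst 0 _
      have huniq' : ∀ c' ∈ cst, ∀ m1 ∈ f, ∀ m2 ∈ f,
          PySem.Str.lower m1 = c' → PySem.Str.lower m2 = c' → m1 = m2 :=
        fun c' hc' => huniq c' (by simp [hc'])
      have hsh := pv_sel_shift (pvRk cst 0) (pvRk (c :: cst) 0) f hshift
      rw [show pvLoopLM f (c :: cst) = match pvLastM f c with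
            | some m => m | none => pvLoopLM f cst from rfl]
      rw [hlast, ih huniq', hsh]
      cases pvSel (pvRk cst 0) f <;> rfl

-- ===== VERDICT (by name: the statement is the Claim_ definition above) =====
theorem detect_prompt_column_spec : Claim_equal_detect_prompt_column := by
  intro f e _ hpre
  unfold Spec_detect_prompt_column detect_prompt_column detect_prompt_column_alt
  by_cases h : e.getD "" = ""
  · unfold Pre_detect_prompt_column at hpre
    rw [if_pos h] at hpre
    simp only [h, ne_eq, not_true_eq_false, if_false]
    have hstep : ∀ b n, pvStep b n = pvGStep (pvRk pvCandidates 0) b n := by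
      intro b n
      simp [pvStep, pvGStep, pv_priority_eq]
    have hfold : f.foldl pvStep none = f.foldl (pvGStep (pvRk pvCandidates 0)) none := by
      congr 1
      funext b n
      exact hstep b n
    have huniq : ∀ c ∈ pvCandidates, ∀ m1 ∈ f, ∀ m2 ∈ f,
        PySem.Str.lower m1 = c → PySem.Str.lower m2 = c → m1 = m2 := by
      intro c hc m1 h1 m2 h2 hl1 hl2
      by_cases heq : m1 = m2
      · exact heq
      · have hsymm : Symmetric (fun a b : String =>
            PySem.Str.lower a = PySem.Str.lower b → a = b) := by
          intro a b hab hba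
          exact (hab hba.symm).symm
        have hmem1 : m1 ∈ f.filter (fun n => pvCandidates.contains (PySem.Str.lower n)) := by
          rw [List.mem_filter]
          exact ⟨h1, by rw [hl1]; simpa using hc⟩
        have hmem2 : m2 ∈ f.filter (fun n => pvCandidates.contains (PySem.Str.lower n)) := by
          rw [List.mem_filter]
          exact ⟨h2, by rw [hl2]; simpa using hc⟩
        exact hpre.2.forall hsymm hmem1 hmem2 heq (by rw [hl1, hl2])
    rw [pv_loopA_eq_LM f pvCandidates (by decide),
        pv_main pvCandidates f huniq, hfold,
        pv_fold_merge (pvRk pvCandidates 0) f none]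
    rfl
  · simp [h]
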